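-- pv_equiv track=rewrite | github.com/SuciuSepty/cozi_de_prioritate | main.py | generator_for_priority
-- ===== SOURCE A (Python) =====
-- client_priorities = {
--     'urgenta': (1, 5),  # (prioritate, timp_servire_minute)
--     'client_cu_dizabilitati': (2, 10),
--     'familie_cu_dizabilitati': (3, 12),
--     'familie_cu_copii': (4, 8),
--     'client_cu_abonament': (5, 7),
--     'mama_insarcinata': (6, 10),
--     'angajatii': (7, 3),
--     'client_fara_abonament': (8, 6)
-- }
--
-- def generator_for_priority(prio_level, count):
--     # Generează 'count' număr de clienți pentru o prioritate dată
--     clients = []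
--     for _ in range(count):
--         client_name = None
--         client_serving_time = 0
--         for name, (p, t) in client_priorities.items():
--             if p == prio_level:
--                 client_name = name
--                 client_serving_time = t
--                 break
--         if client_name is None:
--             continue  # ignoră dacă nu găsește
--         clients.append((client_name, prio_level, client_serving_time))
--     return clients
-- ===== SOURCE B (Python) =====
-- client_priorities = {
--     'urgenta': (1, 5),
--     'client_cu_dizabilitati': (2, 10),
--     'familie_cu_dizabilitati': (3, 12),
--     'familie_cu_copii': (4, 8),
--     'client_cu_abonament': (5, 7),
--     'mama_insarcinata': (6, 10),
--     'angajatii': (7, 3),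
--     'client_fara_abonament': (8, 6)
-- }
--
-- # reverse map priority -> (name, serving_time), built once
-- _by_priority = {p: (name, t) for name, (p, t) in client_priorities.items()}
--
-- def generator_for_priority(prio_level, count):
--     entry = _by_priority.get(prio_level)
--     if entry is None:
--         return []
--     name, t = entry
--     return [(name, prio_level, t)] * count
-- ===== Notes on version B (the rewrite author's own statement) =====
-- stated objective: simpler
-- what changed: Resolve the priority once via a precomputed reverse map and build the result by list multiplication, instead of rescanning the dict inside a count-length append loop.
import Mathlib
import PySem

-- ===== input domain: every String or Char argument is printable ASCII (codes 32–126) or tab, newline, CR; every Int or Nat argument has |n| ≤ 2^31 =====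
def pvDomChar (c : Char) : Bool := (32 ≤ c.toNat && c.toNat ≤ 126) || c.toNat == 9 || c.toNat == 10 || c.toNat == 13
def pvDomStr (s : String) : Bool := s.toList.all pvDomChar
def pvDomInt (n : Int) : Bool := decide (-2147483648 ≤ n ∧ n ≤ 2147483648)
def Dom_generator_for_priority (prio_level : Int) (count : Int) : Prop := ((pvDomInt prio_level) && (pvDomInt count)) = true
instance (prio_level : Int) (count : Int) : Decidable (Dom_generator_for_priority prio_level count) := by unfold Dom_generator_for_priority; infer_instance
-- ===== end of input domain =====

-- B resolves the priority once via a precomputed reverse map and builds the result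
-- by list multiplication, instead of rescanning the dict inside a count-length append loop (objective: simpler).

-- ===== PORT A =====
-- the module-level dict client_priorities, in insertion order
def pvClientPriorities : List (String × Int × Int) :=
  [("urgenta", 1, 5), ("client_cu_dizabilitati", 2, 10), ("familie_cu_dizabilitati", 3, 12),
   ("familie_cu_copii", 4, 8), ("client_cu_abonament", 5, 7), ("mama_insarcinata", 6, 10),
   ("angajatii", 7, 3), ("client_fara_abonament", 8, 6)]

-- the inner 'for name,(p,t) in client_priorities.items(): if p == prio: …; break' scan
def pvInnerScan (prio : Int) : List (String × Int × Int) → Option String × Int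
  | [] => (none, 0)
  | (name, p, t) :: rest => if p = prio then (some name, t) else pvInnerScan prio rest

def generator_for_priority (prio_level : Int) (count : Int) : List (String × Int × Int) :=
  (PySem.List.pyRange 0 count 1).foldl
    (fun clients _ =>
      match pvInnerScan prio_level pvClientPriorities with
      | (some name, t) => clients ++ [(name, prio_level, t)]
      | (none, _) => clients)   -- continue
    []

-- ===== PORT B =====
-- _by_priority = {p: (name, t) for name, (p, t) in client_priorities.items()}
def pvByPriority : PySem.Dict Int (String × Int) :=
  pvClientPriorities.foldl (fun d e => d.insert e.2.1 (e.1, e.2.2)) PySem.Dict.empty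

def generator_for_priority_alt (prio_level : Int) (count : Int) : List (String × Int × Int) :=
  match pvByPriority.get? prio_level with
  | none => []
  | some (name, t) => List.replicate count.toNat (name, prio_level, t)   -- [x] * count

-- ===== PRECONDITION & SPEC =====
def Spec_generator_for_priority (prio_level : Int) (count : Int) (out : List (String × Int × Int)) : Prop := out = generator_for_priority_alt prio_level count
instance (prio_level : Int) (count : Int) (out : List (String × Int × Int)) : Decidable (Spec_generator_for_priority prio_level count out) := by unfold Spec_generator_for_priority; infer_instance

-- ===== CLAIM (what is proved, stated in full; the proofs are below) =====
def Claim_equal_generator_for_priority : Prop := ∀ (prio_level : Int) (count : Int), Dom_generator_for_priority prio_level count → Spec_generator_for_priority prio_level count (generator_for_priority prio_level count)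

-- ===== LEMMAS AND PROOFS =====

-- appending a constant element once per loop iteration is replicate
theorem pv_foldl_const_append {α β : Type} (x : α) (l : List β) (acc : List α) :
    l.foldl (fun clients _ => clients ++ [x]) acc = acc ++ List.replicate l.length x := by
  induction l generalizing acc with
  | nil => simp
  | cons h t ih => rw [List.foldl_cons, ih]; simp [← List.replicate_succ, List.replicate_succ']

-- the inner scan agrees with the reverse-map lookup (both over closed 8-entry tables)
theorem pv_scan_eq_lookup (prio : Int) :
    pvInnerScan prio pvClientPriorities =
      match pvByPriority.get? prio with
      | none => (none, 0)
      | some (name, t) => (some name, t) := by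
  by_cases h1 : prio = 1; · subst h1; decide
  by_cases h2 : prio = 2; · subst h2; decide
  by_cases h3 : prio = 3; · subst h3; decide
  by_cases h4 : prio = 4; · subst h4; decide
  by_cases h5 : prio = 5; · subst h5; decide
  by_cases h6 : prio = 6; · subst h6; decide
  by_cases h7 : prio = 7; · subst h7; decide
  by_cases h8 : prio = 8; · subst h8; decide
  have hscan : pvInnerScan prio pvClientPriorities = (none, 0) := by
    simp [pvClientPriorities, pvInnerScan, Ne.symm h1, Ne.symm h2, Ne.symm h3, Ne.symm h4,
      Ne.symm h5, Ne.symm h6, Ne.symm h7, Ne.symm h8]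
  have hget : pvByPriority.get? prio = none := by
    simp [pvByPriority, pvClientPriorities, PySem.Dict.get?, PySem.Dict.insert, PySem.Dict.empty]
    omega
  rw [hscan, hget]

-- ===== VERDICT (by name: the statement is the Claim_ definition above) =====
theorem generator_for_priority_spec : Claim_equal_generator_for_priority := by
  intro prio count _
  unfold Spec_generator_for_priority generator_for_priority generator_for_priority_alt
  rw [pv_scan_eq_lookup]
  cases hget : pvByPriority.get? prio with
  | none => simp
  | some e =>
      cases e with
      | mk name t =>
        simp only []
        rw [pv_foldl_const_append]
        simp [PySem.List.length_pyRange_one]
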